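-- pv_equiv track=rewrite | github.com/ahmedloona/alpha | appacademy-online-enumerable-exercises-c9c21b3ea398/lib/enumerables2.py | repeated_number_ranges
-- ===== SOURCE A (Python) =====
-- def repeated_number_ranges(arr):
--     ranges = []
--     range_indices = []
--     for idx, num in enumerate(arr):
--         range_indices.append(idx)
--         if (idx == len(arr) - 1) or not (num == arr[idx + 1]):
--             if len(range_indices) >= 2:
--                 ranges.append([range_indices[0], range_indices[-1]])
--             range_indices = []
--     return ranges
-- ===== SOURCE B (Python) =====
-- def repeated_number_ranges(arr):
--     # grouped-run iteration: scan each run of equal values with two indices,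
--     # emit one range per run of length >= 2
--     res = []
--     n = len(arr)
--     i = 0
--     while i < n:
--         j = i + 1
--         while j < n and arr[j] == arr[i]:
--             j += 1
--         if j - i >= 2:
--             res.append([i, j - 1])
--         i = j
--     return res
-- ===== Notes on version B (the rewrite author's own statement) =====
-- stated objective: alternative
-- what changed: Replaces the per-index buffer of enumerate-with-lookahead by two-pointer run scanning: an inner loop advances over each maximal run of equal values and a range is emitted per run, so no list of indices is ever built.
import Mathlib
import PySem

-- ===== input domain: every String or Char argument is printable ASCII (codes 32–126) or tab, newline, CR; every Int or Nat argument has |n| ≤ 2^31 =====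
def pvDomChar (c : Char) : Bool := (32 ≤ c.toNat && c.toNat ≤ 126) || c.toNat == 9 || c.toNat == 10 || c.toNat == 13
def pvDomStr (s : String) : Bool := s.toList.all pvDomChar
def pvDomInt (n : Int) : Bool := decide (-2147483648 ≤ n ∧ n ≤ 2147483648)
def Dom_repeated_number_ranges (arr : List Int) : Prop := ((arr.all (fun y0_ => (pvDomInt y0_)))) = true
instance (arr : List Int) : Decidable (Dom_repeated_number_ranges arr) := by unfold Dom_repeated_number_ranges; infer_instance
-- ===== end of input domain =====

-- B replaces A's per-index buffer + lookahead by two-pointer run scanning (same cost, no index list).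

-- ===== PORT A =====
-- loop body of A's single for-loop over enumerate(arr); state = (ranges, range_indices)
def pvStepA (arr : List Int) (st : List (List Int) × List Int) (p : Int × Int) :
    List (List Int) × List Int :=
  let ris := st.2 ++ [p.1]
  if (p.1 == (arr.length : Int) - 1) || !(p.2 == PySem.List.pyGetD arr (p.1 + 1) 0) then
    (if 2 ≤ ris.length then
        st.1 ++ [[PySem.List.pyGetD ris 0 0, PySem.List.pyGetD ris (-1) 0]]
      else st.1, [])
  else (st.1, ris)

def repeated_number_ranges (arr : List Int) : List (List Int) :=
  ((PySem.List.enumerate arr 0).foldl (pvStepA arr) ([], [])).1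

-- ===== PORT B =====
-- inner while: advance j while j < n and arr[j] == v
def pvScan (arr : List Int) (v : Int) (j : Nat) : Nat :=
  if j < arr.length ∧ PySem.List.pyGetD arr (j : Int) 0 = v then pvScan arr v (j + 1) else j
termination_by arr.length - j
decreasing_by omega

theorem pvScan_ge (arr : List Int) (v : Int) (j : Nat) : j ≤ pvScan arr v j := by
  unfold pvScan
  split
  · have := pvScan_ge arr v (j + 1)
    omega
  · exact le_refl j
termination_by arr.length - j
decreasing_by omega

-- outer while over i
def pvOuterB (arr : List Int) (res : List (List Int)) (i : Nat) : List (List Int) :=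
  if i < arr.length then
    let j := pvScan arr (PySem.List.pyGetD arr (i : Int) 0) (i + 1)
    pvOuterB arr (res ++ if 2 ≤ j - i then [[(i : Int), (j : Int) - 1]] else []) j
  else res
termination_by arr.length - i
decreasing_by
  have := pvScan_ge arr (PySem.List.pyGetD arr (i : Int) 0) (i + 1)
  omega

def repeated_number_ranges_alt (arr : List Int) : List (List Int) :=
  pvOuterB arr [] 0

-- ===== PRECONDITION & SPEC =====
def Spec_repeated_number_ranges (arr : List Int) (out : List (List Int)) : Prop := out = repeated_number_ranges_alt arr
instance (arr : List Int) (out : List (List Int)) : Decidable (Spec_repeated_number_ranges arr out) := by unfold Spec_repeated_number_ranges; infer_instance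

-- ===== CLAIM (what is proved, stated in full; the proofs are below) =====
def Claim_equal_repeated_number_ranges : Prop := ∀ (arr : List Int), Dom_repeated_number_ranges arr → Spec_repeated_number_ranges arr (repeated_number_ranges arr)

-- ===== LEMMAS AND PROOFS =====

-- reference stepper: A's loop re-expressed as index recursion with run start s
def pvG (arr : List Int) (i s : Nat) (ranges : List (List Int)) : List (List Int) :=
  if i < arr.length then
    if ((i : Int) == (arr.length : Int) - 1)
        || !(arr.getD i 0 == PySem.List.pyGetD arr ((i : Int) + 1) 0) then
      pvG arr (i + 1) (i + 1) (ranges ++ if 2 ≤ i + 1 - s then [[(s : Int), (i : Int)]] else [])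
    else pvG arr (i + 1) s ranges
  else ranges
termination_by arr.length - i
decreasing_by all_goals omega

-- the buffer range_indices when the current run started at s and we are at index i
def pvRis (s i : Nat) : List Int := (List.range' s (i - s)).map (fun m => (m : Int))

theorem pvRis_self (s : Nat) : pvRis s s = [] := by simp [pvRis]

theorem pvRis_snoc (s i : Nat) (h : s ≤ i) : pvRis s i ++ [(i : Int)] = pvRis s (i + 1) := by
  have h1 : i + 1 - s = (i - s) + 1 := by omega
  have h2 : s + (i - s) = i := by omega
  simp [pvRis, h1, List.range'_1_concat, h2]

theorem pvRis_length (s i : Nat) : (pvRis s i).length = i - s := by simp [pvRis]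

theorem pvRis_head (s i : Nat) (h : s < i) :
    PySem.List.pyGetD (pvRis s i) 0 0 = (s : Int) := by
  have h1 : i - s = (i - s - 1) + 1 := by omega
  rw [pvRis, h1, List.range'_succ]
  simp [PySem.List.pyGetD_zero_cons]

theorem pvRis_last (s i : Nat) (h : s ≤ i) :
    PySem.List.pyGetD (pvRis s (i + 1)) (-1) 0 = (i : Int) := by
  rw [← pvRis_snoc s i h]
  exact PySem.List.pyGetD_neg_one_append_singleton _ _ _

-- A's fold over the enumerate suffix from i, buffer pvRis s i, equals pvG
theorem pvFold_eq_G (arr : List Int) (i s : Nat) (ranges : List (List Int))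
    (hsi : s ≤ i) (hin : i ≤ arr.length) :
    ((PySem.List.enumerate (arr.drop i) (i : Int)).foldl (pvStepA arr) (ranges, pvRis s i)).1
      = pvG arr i s ranges := by
  by_cases h : i < arr.length
  · have hdrop : arr.drop i = arr[i] :: arr.drop (i + 1) :=
      (List.getElem_cons_drop h).symm
    rw [hdrop, PySem.List.enumerate_cons, List.foldl_cons]
    have hstep : pvStepA arr (ranges, pvRis s i) ((i : Int), arr[i]) =
        if ((i : Int) == (arr.length : Int) - 1)
            || !(arr.getD i 0 == PySem.List.pyGetD arr ((i : Int) + 1) 0) then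
          ((ranges ++ if 2 ≤ i + 1 - s then [[(s : Int), (i : Int)]] else []), [])
        else (ranges, pvRis s (i + 1)) := by
      rw [pvStepA]
      simp only [pvRis_snoc s i hsi, List.getD_eq_getElem?_getD, List.getElem?_eq_getElem h,
        Option.getD_some]
      split
      · rw [pvRis_length, pvRis_head s (i + 1) (by omega), pvRis_last s i hsi]
        split <;> simp
      · rfl
    rw [hstep, pvG, if_pos h]
    split
    · have : ((i : Int) + 1) = ((i + 1 : Nat) : Int) := by push_cast; ring
      rw [this, ← pvRis_self (i + 1)]
      exact pvFold_eq_G arr (i + 1) (i + 1) _ (le_refl _) h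
    · have : ((i : Int) + 1) = ((i + 1 : Nat) : Int) := by push_cast; ring
      rw [this]
      exact pvFold_eq_G arr (i + 1) s ranges (by omega) h
  · have hi : i = arr.length := by omega
    rw [pvG, if_neg h]
    simp [hi]
termination_by arr.length - i
decreasing_by all_goals omega

-- combined specification of the inner while loop pvScan
theorem pvScan_spec (arr : List Int) (v : Int) (j : Nat) (hj : j ≤ arr.length) :
    pvScan arr v j ≤ arr.length ∧
    (∀ m, j ≤ m → m < pvScan arr v j → arr.getD m 0 = v) ∧
    (pvScan arr v j = arr.length ∨ arr.getD (pvScan arr v j) 0 ≠ v) := by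
  rw [pvScan]
  split
  · rename_i hcond
    have ih := pvScan_spec arr v (j + 1) (by omega)
    have hge := pvScan_ge arr v (j + 1)
    refine ⟨ih.1, ?_, ih.2.2⟩
    intro m hm1 hm2
    rcases Nat.eq_or_lt_of_le hm1 with rfl | hlt
    · have := hcond.2
      rwa [PySem.List.pyGetD_natCast] at this
    · exact ih.2.1 m hlt hm2
  · rename_i hcond
    refine ⟨hj, fun m hm1 hm2 => absurd hm1 (by omega), ?_⟩
    by_cases hlt : j < arr.length
    · right
      intro hv
      exact hcond ⟨hlt, by rwa [PySem.List.pyGetD_natCast]⟩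
    · left; omega
termination_by arr.length - j
decreasing_by omega

-- walking pvG through one maximal run from i (run started at s) reaches its end j
theorem pvG_run (arr : List Int) (v : Int) (j : Nat) (hjn : j ≤ arr.length)
    (hstop : j = arr.length ∨ arr.getD j 0 ≠ v)
    (i s : Nat) (ranges : List (List Int)) (hsi : s ≤ i) (hij : i < j)
    (hrun : ∀ m, s ≤ m → m < j → arr.getD m 0 = v) :
    pvG arr i s ranges
      = pvG arr j j (ranges ++ if 2 ≤ j - s then [[(s : Int), (j : Int) - 1]] else []) := by
  have hi : i < arr.length := by omega
  rw [pvG, if_pos hi]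
  have h1 : arr.getD i 0 = v := hrun i hsi hij
  by_cases hlast : i + 1 = j
  · have hcond : (((i : Int) == (arr.length : Int) - 1)
        || !(arr.getD i 0 == PySem.List.pyGetD arr ((i : Int) + 1) 0)) = true := by
      rcases hstop with hjn' | hne
      · have hi' : ((i : Int)) = (arr.length : Int) - 1 := by omega
        simp [hi']
      · have h2 : PySem.List.pyGetD arr ((i : Int) + 1) 0 = arr.getD j 0 := by
          have hc : ((i : Int) + 1) = ((j : Nat) : Int) := by omega
          rw [hc, PySem.List.pyGetD_natCast]
        rw [h1, h2]
        simp [beq_iff_eq]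
        right
        rw [← List.getD_eq_getElem?_getD]
        exact fun hv => hne hv.symm
    rw [if_pos hcond]
    have e3 : (ranges ++ if 2 ≤ i + 1 - s then [[(s : Int), (i : Int)]] else [])
        = (ranges ++ if 2 ≤ j - s then [[(s : Int), (j : Int) - 1]] else []) := by
      have e1 : i + 1 - s = j - s := by omega
      have e2 : ((i : Int)) = (j : Int) - 1 := by omega
      rw [e1, e2]
    rw [e3, hlast]
  · have h2 : PySem.List.pyGetD arr ((i : Int) + 1) 0 = v := by
      have hc : ((i : Int) + 1) = ((i + 1 : Nat) : Int) := by omega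
      rw [hc, PySem.List.pyGetD_natCast]
      exact hrun (i + 1) (by omega) (by omega)
    have h3 : ¬ (i : Int) = (arr.length : Int) - 1 := by omega
    have hcond : (((i : Int) == (arr.length : Int) - 1)
        || !(arr.getD i 0 == PySem.List.pyGetD arr ((i : Int) + 1) 0)) = false := by
      rw [h1, h2]
      simp [h3]
    rw [hcond]
    simp only [Bool.false_eq_true, if_false]
    exact pvG_run arr v j hjn hstop (i + 1) s ranges (by omega) (by omega) hrun
termination_by j - i
decreasing_by omega

-- pvG at a run boundary equals B's outer loop
theorem pvG_eq_outer (arr : List Int) (i : Nat) (ranges : List (List Int)) :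
    pvG arr i i ranges = pvOuterB arr ranges i := by
  by_cases h : i < arr.length
  · rw [pvOuterB, if_pos h]
    set v := PySem.List.pyGetD arr (i : Int) 0 with hv
    set j := pvScan arr v (i + 1) with hj
    have hge : i + 1 ≤ j := pvScan_ge arr v (i + 1)
    have hspec := pvScan_spec arr v (i + 1) (by omega)
    rw [← hj] at hspec
    have hvrun : ∀ m, i ≤ m → m < j → arr.getD m 0 = v := by
      intro m hm1 hm2
      rcases Nat.eq_or_lt_of_le hm1 with rfl | hlt
      · rw [hv, PySem.List.pyGetD_natCast]
      · exact hspec.2.1 m hlt hm2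
    rw [pvG_run arr v j hspec.1 hspec.2.2 i i ranges (le_refl i) (by omega) hvrun]
    rw [pvG_eq_outer arr j _]
  · rw [pvG, if_neg h, pvOuterB, if_neg h]
termination_by arr.length - i
decreasing_by
  have := pvScan_ge arr (PySem.List.pyGetD arr (i : Int) 0) (i + 1)
  omega

-- ===== VERDICT (by name: the statement is the Claim_ definition above) =====
theorem repeated_number_ranges_spec : Claim_equal_repeated_number_ranges := by
  intro arr _
  unfold Spec_repeated_number_ranges repeated_number_ranges repeated_number_ranges_alt
  have h0 : PySem.List.enumerate arr 0 = PySem.List.enumerate (arr.drop 0) ((0 : Nat) : Int) := by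
    simp
  rw [h0, ← pvRis_self 0, pvFold_eq_G arr 0 0 [] (le_refl 0) (by omega),
    pvG_eq_outer arr 0 []]
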